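-- pv_equiv track=rewrite | github.com/dbsgur/week01_5team | hyeok/18222.py | tooe_mose
-- ===== SOURCE A (Python) =====
-- def tooe_mose(n):
--     if n == 0:
--         return 0
--     elif n == 1:
--         return 1
--     elif n % 2:
--         return 1 - tooe_mose(n//2)
--     else:
--         return tooe_mose(n//2)
-- ===== SOURCE B (Python) =====
-- def tooe_mose(n):
--     p = 0
--     while n > 0:
--         p += n & 1
--         n >>= 1
--     return p % 2
-- ===== Notes on version B (the rewrite author's own statement) =====
-- stated objective: simpler
-- what changed: Replaces the recursion over n//2 with a single iterative loop that sums the bits of n and returns the sum mod 2 (popcount parity).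
import Mathlib
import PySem

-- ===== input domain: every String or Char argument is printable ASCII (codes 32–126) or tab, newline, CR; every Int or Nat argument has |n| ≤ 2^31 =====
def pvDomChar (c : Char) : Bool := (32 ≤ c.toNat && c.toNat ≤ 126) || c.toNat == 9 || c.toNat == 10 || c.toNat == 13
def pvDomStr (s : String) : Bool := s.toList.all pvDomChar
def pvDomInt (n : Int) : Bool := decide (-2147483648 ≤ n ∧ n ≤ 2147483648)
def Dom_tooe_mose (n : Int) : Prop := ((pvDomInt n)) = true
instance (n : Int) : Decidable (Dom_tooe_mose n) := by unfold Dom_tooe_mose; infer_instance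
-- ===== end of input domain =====

-- B replaces the recursion over n//2 with one loop summing the bits of n (popcount parity); same cost, simpler.
-- A diverges (Python RecursionError) on negative n, so Pre_ restricts to 0 ≤ n; B's loop returns 0 there.
-- ===== PORT A =====
-- A's recursion diverges in Python for n < 0; the fuel n.toNat + 1 is enough for every n ≥ 0 (inside Pre_),
-- so on Pre_ this is a step-for-step transcription of A's recursion.
def tooe_moseGo : Nat → Int → Int
  | 0, _ => 0
  | fuel + 1, n =>
    if n = 0 then 0
    else if n = 1 then 1
    else if PySem.Int.mod n 2 ≠ 0 then 1 - tooe_moseGo fuel (PySem.Int.floordiv n 2)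
    else tooe_moseGo fuel (PySem.Int.floordiv n 2)

def tooe_mose (n : Int) : Int := tooe_moseGo (n.toNat + 1) n

-- ===== PORT B =====
-- the while loop: p accumulates n & 1 (= n % 2 for n > 0); n >>= 1 is floor division by 2
def tooe_moseLoop (p : Int) (m : Int) : Int :=
  if h : 0 < m then tooe_moseLoop (p + PySem.Int.mod m 2) (PySem.Int.floordiv m 2)
  else PySem.Int.mod p 2
termination_by m.toNat
decreasing_by
  rw [PySem.Int.floordiv_eq_ediv_of_pos (by omega : (0:Int) < 2)]
  omega

def tooe_mose_alt (n : Int) : Int := tooe_moseLoop 0 n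

-- ===== PRECONDITION & SPEC =====
-- Pre_: exactly the inputs where Python A returns (on n < 0 it recurses forever on n//2 = -1 and raises RecursionError)
def Pre_tooe_mose (n : Int) : Prop := 0 ≤ n
instance (n : Int) : Decidable (Pre_tooe_mose n) := by unfold Pre_tooe_mose; infer_instance
def pvWitness_tooe_mose : Int := 6

def Spec_tooe_mose (n : Int) (out : Int) : Prop := out = tooe_mose_alt n
instance (n : Int) (out : Int) : Decidable (Spec_tooe_mose n out) := by unfold Spec_tooe_mose; infer_instance

-- ===== CLAIM (what is proved, stated in full; the proofs are below) =====
def Claim_equal_tooe_mose : Prop := ∀ (n : Int), Dom_tooe_mose n → Pre_tooe_mose n → Spec_tooe_mose n (tooe_mose n)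

-- ===== LEMMAS AND PROOFS =====
theorem loop_step (p m : Int) (h : 0 < m) :
    tooe_moseLoop p m = tooe_moseLoop (p + PySem.Int.mod m 2) (PySem.Int.floordiv m 2) := by
  conv_lhs => rw [tooe_moseLoop]
  rw [dif_pos h]

theorem loop_base (p m : Int) (h : ¬ 0 < m) : tooe_moseLoop p m = PySem.Int.mod p 2 := by
  rw [tooe_moseLoop, dif_neg h]

theorem loop_flip : ∀ (k : Nat) (m : Int), m.toNat ≤ k → ∀ (p : Int),
    tooe_moseLoop (p + 1) m = 1 - tooe_moseLoop p m := by
  intro k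
  induction k with
  | zero =>
    intro m hm p
    have h : ¬ 0 < m := by omega
    rw [loop_base _ _ h, loop_base _ _ h,
        PySem.Int.mod_eq_emod_of_pos (by omega), PySem.Int.mod_eq_emod_of_pos (by omega)]
    omega
  | succ k ih =>
    intro m hm p
    by_cases h : 0 < m
    · have h2 : PySem.Int.floordiv m 2 = m / 2 := PySem.Int.floordiv_eq_ediv_of_pos (by omega)
      rw [loop_step (p + 1) m h, loop_step p m h,
          show p + 1 + PySem.Int.mod m 2 = (p + PySem.Int.mod m 2) + 1 by ring]
      exact ih _ (by rw [h2]; omega) _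
    · rw [loop_base _ _ h, loop_base _ _ h,
          PySem.Int.mod_eq_emod_of_pos (by omega), PySem.Int.mod_eq_emod_of_pos (by omega)]
      omega

theorem main_lemma : ∀ (fuel : Nat) (n : Int), 0 ≤ n → n < fuel →
    tooe_moseGo fuel n = tooe_moseLoop 0 n := by
  intro fuel
  induction fuel with
  | zero => intro n hn hlt; exfalso; omega
  | succ fuel ih =>
    intro n hn hlt
    have hmod : PySem.Int.mod n 2 = n % 2 := PySem.Int.mod_eq_emod_of_pos (by omega)
    have hdiv : PySem.Int.floordiv n 2 = n / 2 := PySem.Int.floordiv_eq_ediv_of_pos (by omega)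
    by_cases h0 : n = 0
    · subst h0
      rw [loop_base 0 0 (by omega), PySem.Int.mod_eq_emod_of_pos (by omega)]
      simp [tooe_moseGo]
    · by_cases h1 : n = 1
      · subst h1
        rw [loop_step 0 1 (by omega), hmod, hdiv]
        norm_num
        rw [loop_base 1 0 (by omega), PySem.Int.mod_eq_emod_of_pos (by omega)]
        simp [tooe_moseGo]
      · have h2 : (2:Int) ≤ n := by omega
        have hrec := ih (n / 2) (by omega) (by omega)
        have hpos : (0:Int) < n := by omega
        by_cases hodd : PySem.Int.mod n 2 ≠ 0
        · have hm1 : PySem.Int.mod n 2 = 1 := by omega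
          simp only [tooe_moseGo, if_neg h0, if_neg h1, if_pos hodd]
          rw [hdiv, hrec, loop_step 0 n hpos, hm1, hdiv,
              loop_flip (n / 2).toNat (n / 2) (le_refl _) 0]
        · have hm0 : PySem.Int.mod n 2 = 0 := by omega
          simp only [tooe_moseGo, if_neg h0, if_neg h1, if_neg hodd]
          rw [hdiv, hrec, loop_step 0 n hpos, hm0, hdiv]
          norm_num

-- ===== VERDICT (by name: the statement is the Claim_ definition above) =====
theorem tooe_mose_spec : Claim_equal_tooe_mose := by
  intro n _ hpre
  unfold Spec_tooe_mose tooe_mose tooe_mose_alt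
  exact main_lemma _ n hpre (by omega)
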